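-- pv_equiv track=rewrite | github.com/T-Srikanth/DSML | A5.py | solve
-- ===== SOURCE A (Python) =====
-- def solve(A):
--   n=len(A)
--   if n==1:
--     return 1
--   if n==2:
--     return 0
--   sumEven = 0
--   sumOdd = 0
--   for i in range(n) : #calculate sum of elements at even indices and odd indices
--     if (i % 2 == 0) :
--       sumEven += A[i]
--
--     else :
--       sumOdd += A[i]
--   currOdd = 0
--   currEven = A[0]
--   res = 0
--   newEvenSum = 0
--   newOddSum = 0
--   for i in range(1,n-1): #to handle elements from first index to last but one index
--     if i%2 :
--       currOdd += A[i]
--       newEvenSum = currEven + sumOdd- currOdd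
--       newOddSum = currOdd + sumEven - currEven - A[i]
--     else :
--       currEven += A[i]
--       newOddSum = currOdd + sumEven  - currEven
--       newEvenSum = currEven + sumOdd - currOdd -A[i]
--     if (newEvenSum == newOddSum) :
--       res+=1
--   if (sumOdd == sumEven - A[0]) :  #to handle 0 index element
--     res+=1
--   if (n % 2 == 1) :  #to handle (n-1) last index element
--     if (sumOdd == sumEven - A[n - 1]) :
--       res+=1
--   else :
--     if (sumEven == sumOdd - A[n - 1]) :
--       res+=1
--   return res
-- ===== SOURCE B (Python) =====
-- def solve(A):
--     n = len(A)
--     S = 0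
--     for i in range(n):
--         S += A[i] if i % 2 == 0 else -A[i]
--     res = 0
--     p = 0
--     for i in range(n):
--         q = p + (A[i] if i % 2 == 0 else -A[i])
--         if p + q == S:
--             res += 1
--         p = q
--     return res
-- ===== Notes on version B (the rewrite author's own statement) =====
-- stated objective: simpler
-- what changed: B replaces A's three hand-rolled edge cases and incremental even/odd bookkeeping by one uniform rule: with signed prefix sums P (adding A[i] at even i, subtracting at odd i) and total S, index i is removable iff P[i]+P[i+1]==S, so B is two plain loops with a single condition.
-- intended difference: On two-element lists containing a 0, A's hard-coded 'if n==2: return 0' returns 0, while B returns the number of elements whose removal leaves the single remaining element equal to 0 (1 or 2), which is the intended count of removable indices. — e.g. on solve([0, 1]): A returns 0, B returns 1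
import Mathlib
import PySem

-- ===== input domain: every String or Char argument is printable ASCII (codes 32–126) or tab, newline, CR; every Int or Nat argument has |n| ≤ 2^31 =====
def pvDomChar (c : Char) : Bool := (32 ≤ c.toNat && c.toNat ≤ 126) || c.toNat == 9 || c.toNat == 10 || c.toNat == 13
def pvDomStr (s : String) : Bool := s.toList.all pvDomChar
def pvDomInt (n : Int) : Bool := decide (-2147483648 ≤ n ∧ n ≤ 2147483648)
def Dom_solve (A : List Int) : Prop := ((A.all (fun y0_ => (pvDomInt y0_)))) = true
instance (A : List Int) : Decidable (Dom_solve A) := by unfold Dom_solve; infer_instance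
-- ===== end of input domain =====

-- B replaces A's three hand-rolled edge cases and incremental even/odd bookkeeping with signed
-- prefix sums and one uniform condition P[i]+P[i+1]==S (objective: simpler).

-- ===== PORT A =====
def solve (A : List Int) : Int :=
  let n : Int := PySem.List.len A
  if n == 1 then 1
  else if n == 2 then 0
  else
    let eo := (PySem.List.pyRange 0 n 1).foldl
      (fun (p : Int × Int) i =>
        if PySem.Int.mod i 2 == 0 then (p.1 + PySem.List.pyGetD A i 0, p.2)
        else (p.1, p.2 + PySem.List.pyGetD A i 0)) (0, 0)
    let sumEven := eo.1
    let sumOdd := eo.2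
    let st := (PySem.List.pyRange 1 (n - 1) 1).foldl
      (fun (st : Int × Int × Int) i =>
        if PySem.Int.mod i 2 != 0 then
          let currOdd := st.1 + PySem.List.pyGetD A i 0
          let newEvenSum := st.2.1 + sumOdd - currOdd
          let newOddSum := currOdd + sumEven - st.2.1 - PySem.List.pyGetD A i 0
          (currOdd, st.2.1, if newEvenSum == newOddSum then st.2.2 + 1 else st.2.2)
        else
          let currEven := st.2.1 + PySem.List.pyGetD A i 0
          let newOddSum := st.1 + sumEven - currEven
          let newEvenSum := currEven + sumOdd - st.1 - PySem.List.pyGetD A i 0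
          (st.1, currEven, if newEvenSum == newOddSum then st.2.2 + 1 else st.2.2))
      (0, PySem.List.pyGetD A 0 0, 0)
    let res := st.2.2
    let res := if sumOdd == sumEven - PySem.List.pyGetD A 0 0 then res + 1 else res
    if PySem.Int.mod n 2 == 1 then
      if sumOdd == sumEven - PySem.List.pyGetD A (n - 1) 0 then res + 1 else res
    else
      if sumEven == sumOdd - PySem.List.pyGetD A (n - 1) 0 then res + 1 else res

-- ===== PORT B =====
def solve_alt (A : List Int) : Int :=
  let n : Int := PySem.List.len A
  let S := (PySem.List.pyRange 0 n 1).foldl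
    (fun acc i =>
      acc + (if PySem.Int.mod i 2 == 0 then PySem.List.pyGetD A i 0
             else -PySem.List.pyGetD A i 0)) 0
  let st := (PySem.List.pyRange 0 n 1).foldl
    (fun (st : Int × Int) i =>
      let q := st.2 + (if PySem.Int.mod i 2 == 0 then PySem.List.pyGetD A i 0
                       else -PySem.List.pyGetD A i 0)
      (if st.2 + q == S then st.1 + 1 else st.1, q)) (0, 0)
  st.1

-- ===== PRECONDITION & SPEC =====
-- Pre_ excludes only the empty list, on which A raises IndexError (it reads A[0]).
def Pre_solve (A : List Int) : Prop := A ≠ []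
instance (A : List Int) : Decidable (Pre_solve A) := by unfold Pre_solve; infer_instance
def pvWitness_solve : List Int := [1, 2, 3]

-- On two-element lists containing a 0, A's hard-coded 'if n==2: return 0' returns 0, while B
-- returns the number of removable indices (1 or 2), which is the intended count.
def D_solve (A : List Int) : Prop := A.length = 2 ∧ (A.getD 0 0 = 0 ∨ A.getD 1 0 = 0)
instance (A : List Int) : Decidable (D_solve A) := by unfold D_solve; infer_instance

def Spec_solve (A : List Int) (out : Int) : Prop := ¬ D_solve A → out = solve_alt A
instance (A : List Int) (out : Int) : Decidable (Spec_solve A out) := by unfold Spec_solve; infer_instance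

def pvDiffWitness_solve : List Int := [0, 1]
def pvDiffWitnessOut_solve : Int × Int := (0, 1)

-- ===== CLAIM (what is proved, stated in full; the proofs are below) =====
def Claim_unchanged_solve : Prop := ∀ (A : List Int), Dom_solve A → Pre_solve A → Spec_solve A (solve A)
def Claim_changed_solve : Prop := Dom_solve (pvDiffWitness_solve) ∧ Pre_solve (pvDiffWitness_solve) ∧ D_solve (pvDiffWitness_solve) ∧ solve (pvDiffWitness_solve) = pvDiffWitnessOut_solve.1 ∧ solve_alt (pvDiffWitness_solve) = pvDiffWitnessOut_solve.2 ∧ pvDiffWitnessOut_solve.1 ≠ pvDiffWitnessOut_solve.2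
def Claim_exact_solve : Prop := ∀ (A : List Int), Dom_solve A → Pre_solve A → D_solve A → solve A ≠ solve_alt A

-- ===== LEMMAS AND PROOFS =====

def gA (A : List Int) (j : Nat) : Int := A.getD j 0
def Esum (A : List Int) (k : Nat) : Int := ∑ j ∈ Finset.range k, (if j % 2 = 0 then gA A j else 0)
def Osum (A : List Int) (k : Nat) : Int := ∑ j ∈ Finset.range k, (if j % 2 = 0 then 0 else gA A j)
def Pp (A : List Int) (k : Nat) : Int := Esum A k - Osum A k
lemma Esum_succ (A : List Int) (k : Nat) :
    Esum A (k + 1) = Esum A k + (if k % 2 = 0 then gA A k else 0) := Finset.sum_range_succ _ k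
lemma Osum_succ (A : List Int) (k : Nat) :
    Osum A (k + 1) = Osum A k + (if k % 2 = 0 then 0 else gA A k) := Finset.sum_range_succ _ k
lemma loopS (A : List Int) (k : Nat) :
    (PySem.List.pyRange 0 (k : Int) 1).foldl
      (fun acc i =>
        acc + (if PySem.Int.mod i 2 == 0 then PySem.List.pyGetD A i 0
               else -PySem.List.pyGetD A i 0)) 0 = Pp A k := by
  induction k with
  | zero => simp [PySem.List.pyRange_one_eq_nil, Pp, Esum, Osum]
  | succ k ih =>
    have hc : ((k : Int) + 1) = ((k + 1 : Nat) : Int) := by push_cast; ring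
    rw [← hc, PySem.List.pyRange_one_succ_right (by positivity), List.foldl_append, ih]
    have hm : PySem.Int.mod (k : Int) 2 = ((k % 2 : Nat) : Int) := by
      exact_mod_cast PySem.Int.mod_natCast k 2
    simp only [List.foldl, hm, PySem.List.pyGetD_natCast, Pp, Esum_succ, Osum_succ]
    rcases Nat.even_or_odd k with h | h
    · have h2 : k % 2 = 0 := Nat.even_iff.mp h
      simp [h2, gA]; ring
    · have h2 : k % 2 = 1 := Nat.odd_iff.mp h
      simp [h2, gA]; ring
def cI (A : List Int) (S : Int) (i : Nat) : Bool := Pp A i + Pp A (i + 1) == S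
lemma loopA1 (A : List Int) (k : Nat) :
    (PySem.List.pyRange 0 (k : Int) 1).foldl
      (fun (p : Int × Int) i =>
        if PySem.Int.mod i 2 == 0 then (p.1 + PySem.List.pyGetD A i 0, p.2)
        else (p.1, p.2 + PySem.List.pyGetD A i 0)) (0, 0) = (Esum A k, Osum A k) := by
  induction k with
  | zero => simp [PySem.List.pyRange_one_eq_nil, Esum, Osum]
  | succ k ih =>
    have hc : ((k : Int) + 1) = ((k + 1 : Nat) : Int) := by push_cast; ring
    rw [← hc, PySem.List.pyRange_one_succ_right (by positivity), List.foldl_append, ih]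
    have hm : PySem.Int.mod (k : Int) 2 = ((k % 2 : Nat) : Int) := by
      exact_mod_cast PySem.Int.mod_natCast k 2
    simp only [List.foldl, hm, PySem.List.pyGetD_natCast, Esum_succ, Osum_succ]
    rcases Nat.even_or_odd k with h | h
    · have h2 : k % 2 = 0 := Nat.even_iff.mp h; simp [h2, gA]
    · have h2 : k % 2 = 1 := Nat.odd_iff.mp h; simp [h2, gA]
lemma Pp_succ (A : List Int) (k : Nat) :
    Pp A (k + 1) = Pp A k + (if k % 2 = 0 then gA A k else -gA A k) := by
  simp only [Pp, Esum_succ, Osum_succ]; split_ifs <;> ring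
lemma loopB (A : List Int) (S : Int) (k : Nat) :
    (PySem.List.pyRange 0 (k : Int) 1).foldl
      (fun (st : Int × Int) i =>
        let q := st.2 + (if PySem.Int.mod i 2 == 0 then PySem.List.pyGetD A i 0
                         else -PySem.List.pyGetD A i 0)
        (if st.2 + q == S then st.1 + 1 else st.1, q)) (0, 0)
    = (((List.range k).countP (cI A S) : Int), Pp A k) := by
  induction k with
  | zero => simp [PySem.List.pyRange_one_eq_nil, Pp, Esum, Osum]
  | succ k ih =>
    have hc : ((k : Int) + 1) = ((k + 1 : Nat) : Int) := by push_cast; ring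
    rw [← hc, PySem.List.pyRange_one_succ_right (by positivity), List.foldl_append, ih]
    have hm : PySem.Int.mod (k : Int) 2 = ((k % 2 : Nat) : Int) := by
      exact_mod_cast PySem.Int.mod_natCast k 2
    have hq : Pp A k + (if PySem.Int.mod (k : Int) 2 == 0 then PySem.List.pyGetD A (k : Int) 0
                         else -PySem.List.pyGetD A (k : Int) 0) = Pp A (k + 1) := by
      rw [Pp_succ, hm]
      rcases Nat.even_or_odd k with h | h
      · have h2 : k % 2 = 0 := Nat.even_iff.mp h; simp [h2, gA]
      · have h2 : k % 2 = 1 := Nat.odd_iff.mp h; simp [h2, gA]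
    simp only [List.foldl, hq, List.range_succ, List.countP_append, List.countP_cons,
      List.countP_nil, cI]
    simp only [Prod.mk.injEq]
    refine ⟨?_, trivial⟩
    push_cast; split_ifs <;> omega
lemma loopA2 (A : List Int) (sE sO : Int) (k : Nat) :
    (PySem.List.pyRange 1 (1 + (k : Int)) 1).foldl
      (fun (st : Int × Int × Int) i =>
        if PySem.Int.mod i 2 != 0 then
          let currOdd := st.1 + PySem.List.pyGetD A i 0
          let newEvenSum := st.2.1 + sO - currOdd
          let newOddSum := currOdd + sE - st.2.1 - PySem.List.pyGetD A i 0
          (currOdd, st.2.1, if newEvenSum == newOddSum then st.2.2 + 1 else st.2.2)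
        else
          let currEven := st.2.1 + PySem.List.pyGetD A i 0
          let newOddSum := st.1 + sE - currEven
          let newEvenSum := currEven + sO - st.1 - PySem.List.pyGetD A i 0
          (st.1, currEven, if newEvenSum == newOddSum then st.2.2 + 1 else st.2.2))
      (0, PySem.List.pyGetD A 0 0, 0)
    = (Osum A (k + 1), Esum A (k + 1),
       ((List.range k).countP (fun j => cI A (sE - sO) (j + 1)) : Int)) := by
  induction k with
  | zero =>
    simp [PySem.List.pyRange_one_eq_nil, Esum, Osum, gA,
      PySem.List.pyGetD_zero]
  | succ k ih =>
    have hc : (1 : Int) + ((k + 1 : Nat) : Int) = (1 + (k : Int)) + 1 := by push_cast; ring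
    rw [hc, PySem.List.pyRange_one_succ_right (by omega), List.foldl_append, ih]
    have hi : (1 : Int) + (k : Int) = ((k + 1 : Nat) : Int) := by push_cast; ring
    have hm : PySem.Int.mod ((k + 1 : Nat) : Int) 2 = (((k + 1) % 2 : Nat) : Int) := by
      exact_mod_cast PySem.Int.mod_natCast (k + 1) 2
    have hPp1 : Pp A (k + 1) = Esum A (k + 1) - Osum A (k + 1) := rfl
    have hPp2 : Pp A (k + 1 + 1) = Esum A (k + 1 + 1) - Osum A (k + 1 + 1) := rfl
    simp only [List.foldl, hi, hm, PySem.List.pyGetD_natCast, List.range_succ,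
      List.countP_append, List.countP_cons, List.countP_nil]
    by_cases hcc : Pp A (k + 1) + Pp A (k + 1 + 1) = sE - sO
    · rcases Nat.even_or_odd k with h | h
      · have h2 : (k + 1) % 2 = 1 := by have := Nat.even_iff.mp h; omega
        have e2 : Esum A (k + 1 + 1) = Esum A (k + 1) := by
          rw [Esum_succ A (k + 1)]; simp [h2]
        have o2 : Osum A (k + 1 + 1) = Osum A (k + 1) + A[k + 1]?.getD 0 := by
          rw [Osum_succ A (k + 1)]; simp [h2, gA, List.getD]
        have hxy : Esum A (k + 1) + sO - (Osum A (k + 1) + A[k + 1]?.getD 0) =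
            Osum A (k + 1) + A[k + 1]?.getD 0 + sE - Esum A (k + 1) - A[k + 1]?.getD 0 := by
          omega
        simp [h2, hxy, cI, hcc, e2, o2]
      · have h2 : (k + 1) % 2 = 0 := by have := Nat.odd_iff.mp h; omega
        have e2 : Esum A (k + 1 + 1) = Esum A (k + 1) + A[k + 1]?.getD 0 := by
          rw [Esum_succ A (k + 1)]; simp [h2, gA, List.getD]
        have o2 : Osum A (k + 1 + 1) = Osum A (k + 1) := by
          rw [Osum_succ A (k + 1)]; simp [h2]
        have hxy : Esum A (k + 1) + A[k + 1]?.getD 0 + sO - Osum A (k + 1) - A[k + 1]?.getD 0 =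
            Osum A (k + 1) + sE - (Esum A (k + 1) + A[k + 1]?.getD 0) := by
          omega
        simp [h2, hxy, cI, hcc, e2, o2]
    · rcases Nat.even_or_odd k with h | h
      · have h2 : (k + 1) % 2 = 1 := by have := Nat.even_iff.mp h; omega
        have e2 : Esum A (k + 1 + 1) = Esum A (k + 1) := by
          rw [Esum_succ A (k + 1)]; simp [h2]
        have o2 : Osum A (k + 1 + 1) = Osum A (k + 1) + A[k + 1]?.getD 0 := by
          rw [Osum_succ A (k + 1)]; simp [h2, gA, List.getD]
        have hxy : ¬ (Esum A (k + 1) + sO - (Osum A (k + 1) + A[k + 1]?.getD 0) =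
            Osum A (k + 1) + A[k + 1]?.getD 0 + sE - Esum A (k + 1) - A[k + 1]?.getD 0) := by
          omega
        simp [h2, hxy, cI, hcc, e2, o2]
      · have h2 : (k + 1) % 2 = 0 := by have := Nat.odd_iff.mp h; omega
        have e2 : Esum A (k + 1 + 1) = Esum A (k + 1) + A[k + 1]?.getD 0 := by
          rw [Esum_succ A (k + 1)]; simp [h2, gA, List.getD]
        have o2 : Osum A (k + 1 + 1) = Osum A (k + 1) := by
          rw [Osum_succ A (k + 1)]; simp [h2]
        have hxy : ¬ (Esum A (k + 1) + A[k + 1]?.getD 0 + sO - Osum A (k + 1) - A[k + 1]?.getD 0 =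
            Osum A (k + 1) + sE - (Esum A (k + 1) + A[k + 1]?.getD 0)) := by
          omega
        simp [h2, hxy, cI, hcc, e2, o2]

lemma alt_eval (A : List Int) :
    solve_alt A = ((List.range A.length).countP (cI A (Pp A A.length)) : Int) := by
  unfold solve_alt
  simp only [PySem.List.len_eq]
  simp only [loopS A A.length]
  rw [loopB A (Pp A A.length) A.length]
lemma beq_congr_int {a b c d : Int} (h : (a = b) ↔ (c = d)) : (a == b) = (c == d) := by
  by_cases h1 : a = b
  · simp [h1, h.mp h1]
  · have h2 : ¬ c = d := fun hc => h1 (h.mpr hc)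
    simp [h1, h2]

lemma count_split (p : Nat → Bool) (m : Nat) :
    (List.range (m + 2)).countP p
      = ((if p 0 then 1 else 0) + (List.range m).countP (fun j => p (j + 1))
          + (if p (m + 1) then 1 else 0) : Nat) := by
  rw [List.range_succ, List.countP_append, List.range_succ_eq_map, List.countP_cons,
    List.countP_map]
  have hco : (p ∘ Nat.succ) = fun j => p (j + 1) := rfl
  rw [hco]
  simp
  omega

lemma main1 (A : List Int) (h1 : A.length = 1) : solve A = solve_alt A := by
  rw [alt_eval]
  have hs : solve A = 1 := by
    unfold solve
    simp [PySem.List.len_eq, h1]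
  rw [hs, h1]
  have hc : cI A (Pp A 1) 0 = true := by
    simp [cI, Pp, Esum, Osum]
  simp [List.range_succ, hc]
lemma main2 (A : List Int) (h2 : A.length = 2) (ha : A.getD 0 0 ≠ 0) (hb : A.getD 1 0 ≠ 0) :
    solve A = solve_alt A := by
  rcases A with _ | ⟨a, A⟩
  · simp at h2
  rcases A with _ | ⟨b, A⟩
  · simp at h2
  rcases A with _ | ⟨c, A⟩
  swap
  · simp at h2
  have ha' : a ≠ 0 := by simpa using ha
  have hb' : b ≠ 0 := by simpa using hb
  rw [alt_eval]
  have hs : solve [a, b] = 0 := by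
    unfold solve
    simp [PySem.List.len_eq]
  rw [hs]
  have hc0 : cI [a, b] (Pp [a, b] 2) 0 = false := by
    simp only [cI, Pp, Esum, Osum, gA, beq_eq_false_iff_ne, ne_eq, Finset.sum_range_succ,
      Finset.sum_range_zero]
    simp
    omega
  have hc1 : cI [a, b] (Pp [a, b] 2) 1 = false := by
    simp only [cI, Pp, Esum, Osum, gA, beq_eq_false_iff_ne, ne_eq, Finset.sum_range_succ,
      Finset.sum_range_zero]
    simp
    omega
  simp [List.range_succ, hc0, hc1]
lemma main3 (A : List Int) (h3 : 3 ≤ A.length) : solve A = solve_alt A := by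
  obtain ⟨m, hm2⟩ : ∃ m, A.length = m + 2 := ⟨A.length - 2, by omega⟩
  rw [alt_eval]
  unfold solve
  simp only [PySem.List.len_eq, hm2]
  have g1 : (((m + 2 : Nat) : Int) == 1) = false := by
    rw [beq_eq_false_iff_ne]; omega
  have g2 : (((m + 2 : Nat) : Int) == 2) = false := by
    rw [beq_eq_false_iff_ne]; omega
  simp only [g1, g2, Bool.false_eq_true, if_false]
  simp only [loopA1 A (m + 2)]
  have hb : (((m + 2 : Nat) : Int)) - 1 = 1 + (m : Int) := by push_cast; ring
  rw [hb, loopA2 A (Esum A (m + 2)) (Osum A (m + 2)) m]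
  have hL : (1 : Int) + (m : Int) = ((m + 1 : Nat) : Int) := by push_cast; ring
  rw [hL]
  have hmod : PySem.Int.mod (((m + 2 : Nat) : Int)) 2 = (((m + 2) % 2 : Nat) : Int) := by
    exact_mod_cast PySem.Int.mod_natCast (m + 2) 2
  rw [count_split (cI A (Pp A (m + 2))) m]
  simp only [Pp, PySem.List.pyGetD_natCast, PySem.List.pyGetD_zero, hmod]
  -- facts for the index-0 condition
  have hP0 : Pp A 0 = 0 := by simp [Pp, Esum, Osum]
  have hP1 : Pp A (0 + 1) = A.getD 0 0 := by simp [Pp, Esum, Osum, gA]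
  have b0 : (Osum A (m + 2) == Esum A (m + 2) - A.getD 0 0) = cI A (Esum A (m + 2) - Osum A (m + 2)) 0 := by
    unfold cI
    exact beq_congr_int (by rw [hP0, hP1]; constructor <;> intro <;> omega)
  rw [b0]
  have hPm1 : Pp A (m + 1) = Esum A (m + 1) - Osum A (m + 1) := rfl
  have hPm2 : Pp A (m + 1 + 1) = Esum A (m + 1 + 1) - Osum A (m + 1 + 1) := rfl
  have hE12 : Esum A (m + 1 + 1) = Esum A (m + 1) + (if (m + 1) % 2 = 0 then gA A (m + 1) else 0) :=
    Esum_succ A (m + 1)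
  have hO12 : Osum A (m + 1 + 1) = Osum A (m + 1) + (if (m + 1) % 2 = 0 then 0 else gA A (m + 1)) :=
    Osum_succ A (m + 1)
  have hEe : Esum A (m + 1 + 1) = Esum A (m + 2) := by norm_num
  have hOe : Osum A (m + 1 + 1) = Osum A (m + 2) := by norm_num
  rcases Nat.even_or_odd m with h | h
  · -- m even, n = m + 2 even, last index m + 1 odd: A takes the else (sumEven == sumOdd - A[n-1]) branch
    have hp : (m + 2) % 2 = 0 := by have := Nat.even_iff.mp h; omega
    have hp1 : (m + 1) % 2 = 1 := by have := Nat.even_iff.mp h; omega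
    simp only [hp1] at hE12 hO12
    have bL : (Esum A (m + 2) == Osum A (m + 2) - A.getD (m + 1) 0)
        = cI A (Esum A (m + 2) - Osum A (m + 2)) (m + 1) := by
      unfold cI
      refine beq_congr_int ?_
      rw [hPm1, hPm2, ← hEe, ← hOe, hE12, hO12]
      simp only [gA]
      constructor <;> intro <;> omega
    rw [bL]
    have gp : ((((m + 2) % 2 : Nat) : Int)) ≠ 1 := by rw [hp]; omega
    simp only [hp]
    have gb : (((0 : Nat) : Int) == 1) = false := by rw [beq_eq_false_iff_ne]; omega
    simp only [gb, Bool.false_eq_true, if_false]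
    split_ifs <;> push_cast <;> omega
  · -- m odd, n odd, last index m + 1 even: A takes the (sumOdd == sumEven - A[n-1]) branch
    have hp : (m + 2) % 2 = 1 := by have := Nat.odd_iff.mp h; omega
    have hp1 : (m + 1) % 2 = 0 := by have := Nat.odd_iff.mp h; omega
    simp only [hp1, reduceIte] at hE12 hO12
    have bL : (Osum A (m + 2) == Esum A (m + 2) - A.getD (m + 1) 0)
        = cI A (Esum A (m + 2) - Osum A (m + 2)) (m + 1) := by
      unfold cI
      refine beq_congr_int ?_
      rw [hPm1, hPm2, ← hEe, ← hOe, hE12, hO12]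
      simp only [gA]
      constructor <;> intro <;> omega
    rw [bL]
    simp only [hp]
    have gb : (((1 : Nat) : Int) == 1) = true := by simp
    simp only [gb, if_true]
    split_ifs <;> push_cast <;> omega

lemma solveA_len2 (A : List Int) (h2 : A.length = 2) : solve A = 0 := by
  unfold solve
  simp [PySem.List.len_eq, h2]

lemma altB_len2 (a b : Int) :
    solve_alt [a, b] = (if b = 0 then 1 else 0) + (if a = 0 then 1 else 0) := by
  rw [alt_eval]
  have hc0 : cI [a, b] (Pp [a, b] 2) 0 = (b == 0) := by
    simp only [cI, Pp, Esum, Osum, gA, Finset.sum_range_succ, Finset.sum_range_zero]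
    simp
    constructor <;> intro <;> omega
  have hc1 : cI [a, b] (Pp [a, b] 2) 1 = (a == 0) := by
    simp only [cI, Pp, Esum, Osum, gA, Finset.sum_range_succ, Finset.sum_range_zero]
    simp
  simp only [List.length_cons, List.length_nil, List.range_succ, List.range_zero,
    List.countP_append, List.countP_cons, List.countP_nil, hc0, hc1]
  by_cases ha : a = 0 <;> by_cases hb : b = 0 <;> simp [ha, hb]

-- ===== VERDICT (by name: the statement is the Claim_ definition above) =====
theorem solve_spec : Claim_unchanged_solve := by
  intro A _ hpre hd
  have h0 : A.length ≠ 0 := by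
    intro h
    exact hpre (List.length_eq_zero_iff.mp h)
  rcases Nat.lt_or_ge A.length 3 with h | h
  · have h12 : A.length = 1 ∨ A.length = 2 := by omega
    rcases h12 with h1 | h2
    · exact main1 A h1
    · have ha : A.getD 0 0 ≠ 0 := fun hx => hd ⟨h2, Or.inl hx⟩
      have hb : A.getD 1 0 ≠ 0 := fun hx => hd ⟨h2, Or.inr hx⟩
      exact main2 A h2 ha hb
  · exact main3 A h

theorem solve_changed : Claim_changed_solve := by
  unfold Claim_changed_solve; decide

theorem solve_tight : Claim_exact_solve := by
  intro A _ _ hd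
  obtain ⟨h2, hor⟩ := hd
  rcases A with _ | ⟨a, A⟩
  · simp at h2
  rcases A with _ | ⟨b, A⟩
  · simp at h2
  rcases A with _ | ⟨c, A⟩
  swap
  · simp at h2
  rw [solveA_len2 [a, b] h2, altB_len2]
  simp only [List.getD] at hor
  simp at hor
  rcases hor with h | h <;> simp [h] <;> split_ifs <;> omega
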